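-- pv_equiv track=rewrite | github.com/Prabhat-codes/Netlab-internship | Column/math_utilities.py | modify_formula
-- ===== SOURCE A (Python) =====
-- def modify_formula(formula):
--     #add brackets
--     formula = '((' + formula + '))'
--
--     #add spaces
--     new_formula = ''
--     open_bracket = '('
--     close_bracket = ')'
--     operations = ['+', '-', '*', '/', '^']
--
--     for f in formula:
--             if f == open_bracket:
--                 new_formula+=f
--                 new_formula+=" "
--             elif f == close_bracket:
--                 new_formula+=" "
--                 new_formula+=f
--             elif f in operations:
--                 new_formula+=" "
--                 new_formula+=f
--                 new_formula+=" "
--             else: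
--                 new_formula+=f
--
--     return new_formula
-- ===== SOURCE B (Python) =====
-- def modify_formula(formula):
--     formula = '((' + formula + '))'
--     formula = formula.replace('(', '( ').replace(')', ' )')
--     for op in '+-*/^':
--         formula = formula.replace(op, ' ' + op + ' ')
--     return formula
-- ===== Notes on version B (the rewrite author's own statement) =====
-- stated objective: faster
-- what changed: Replaces A's per-character accumulator loop with a chain of whole-string str.replace passes (one per special character); exact because the replacement targets are disjoint and inserted spaces never form a new target.
import Mathlib
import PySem

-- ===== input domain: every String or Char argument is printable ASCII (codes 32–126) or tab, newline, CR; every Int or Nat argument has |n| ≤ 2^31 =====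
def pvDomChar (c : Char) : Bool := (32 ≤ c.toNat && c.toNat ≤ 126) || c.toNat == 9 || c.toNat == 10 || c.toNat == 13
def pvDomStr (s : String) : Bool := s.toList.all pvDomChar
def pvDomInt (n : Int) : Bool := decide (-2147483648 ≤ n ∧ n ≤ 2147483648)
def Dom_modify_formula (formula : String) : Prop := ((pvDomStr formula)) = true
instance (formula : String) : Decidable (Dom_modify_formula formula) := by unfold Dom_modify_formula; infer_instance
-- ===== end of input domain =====

-- B replaces A's per-character accumulator loop by a chain of whole-string replace passes; equal on all inputs.

-- ===== PORT A =====
-- A's per-character loop, appending to an accumulator.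
def modify_formula (formula : String) : String :=
  let wrapped : List Char := ('(' :: '(' :: formula.toList) ++ [')', ')']
  String.ofList (wrapped.foldl (fun acc f =>
    if f = '(' then acc ++ [f, ' ']
    else if f = ')' then acc ++ [' ', f]
    else if f ∈ ['+', '-', '*', '/', '^'] then acc ++ [' ', f, ' ']
    else acc ++ [f]) [])

-- ===== PORT B =====
-- Source B: wrap, then chained str.replace passes (brackets, then each operator in '+-*/^').
def modify_formula_alt (formula : String) : String :=
  let w : String := String.ofList (('(' :: '(' :: formula.toList) ++ [')', ')'])
  let s2 : String := PySem.Str.replace (PySem.Str.replace w "(" "( ") ")" " )"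
  (['+', '-', '*', '/', '^'] : List Char).foldl
    (fun s op => PySem.Str.replace s (String.ofList [op]) (String.ofList [' ', op, ' '])) s2

-- ===== PRECONDITION & SPEC =====
def Spec_modify_formula (formula : String) (out : String) : Prop := out = modify_formula_alt formula
instance (formula : String) (out : String) : Decidable (Spec_modify_formula formula out) := by unfold Spec_modify_formula; infer_instance

-- ===== CLAIM (what is proved, stated in full; the proofs are below) =====
def Claim_equal_modify_formula : Prop := ∀ (formula : String), Dom_modify_formula formula → Spec_modify_formula formula (modify_formula formula)

-- ===== LEMMAS AND PROOFS =====

-- single-char expansion used to reason about both programs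
def pvExpand (f : Char) : List Char :=
  if f = '(' then ['(', ' ']
  else if f = ')' then [' ', ')']
  else if f ∈ (['+', '-', '*', '/', '^'] : List Char) then [' ', f, ' ']
  else [f]

def pvSub (c : Char) (new : List Char) (x : Char) : List Char :=
  if x = c then new else [x]

lemma pv_go_single (c : Char) (new : List Char) :
    ∀ (fuel : Nat) (l acc : List Char), l.length ≤ fuel →
      PySem.Chars.replace.go [c] new fuel l acc
        = acc.reverse ++ l.flatMap (pvSub c new) := by
  intro fuel
  induction fuel with
  | zero =>
    intro l acc h
    have : l = [] := List.length_eq_zero_iff.mp (Nat.le_zero.mp h)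
    subst this
    rw [PySem.Chars.replace.go.eq_def]
    simp
  | succ n ih =>
    intro l acc h
    cases l with
    | nil => rw [PySem.Chars.replace.go.eq_def]; simp
    | cons x t =>
      rw [PySem.Chars.replace.go.eq_def]
      have ht : t.length ≤ n := Nat.lt_succ_iff.mp (by simpa using h)
      by_cases hx : x = c
      · subst hx
        have hpre : List.isPrefixOf [x] (x :: t) = true := by simp [List.isPrefixOf]
        simp only [hpre, if_true, List.length_cons, List.length_nil, List.drop_succ_cons,
          List.drop_zero]
        rw [ih t _ ht]
        simp [pvSub]
      · have hpre : List.isPrefixOf [c] (x :: t) = false := by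
          simp only [List.isPrefixOf, Bool.and_eq_false_iff, beq_eq_false_iff_ne]
          exact Or.inl (Ne.symm hx)
        simp only [hpre, Bool.false_eq_true, if_false]
        rw [ih t _ ht]
        simp [pvSub, hx]

lemma pv_replace_single (l : List Char) (c : Char) (new : List Char) :
    PySem.Chars.replace l [c] new = l.flatMap (pvSub c new) := by
  rw [PySem.Chars.replace]
  simp only [List.isEmpty_cons, Bool.false_eq_true, if_false]
  simpa using pv_go_single c new l.length l [] le_rfl

-- one character pushed through the five operator replaces
lemma pv_ops_single (x : Char) :
    (List.flatMap (pvSub '^' [' ', '^', ' '])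
      (List.flatMap (pvSub '/' [' ', '/', ' '])
        (List.flatMap (pvSub '*' [' ', '*', ' '])
          (List.flatMap (pvSub '-' [' ', '-', ' '])
            (List.flatMap (pvSub '+' [' ', '+', ' ']) [x])))))
      = if x ∈ (['+', '-', '*', '/', '^'] : List Char) then [' ', x, ' '] else [x] := by
  by_cases h1 : x = '+'
  · subst h1; decide
  by_cases h2 : x = '-'
  · subst h2; decide
  by_cases h3 : x = '*'
  · subst h3; decide
  by_cases h4 : x = '/'
  · subst h4; decide
  by_cases h5 : x = '^'
  · subst h5; decide
  simp [pvSub, h1, h2, h3, h4, h5]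

-- one character pushed through the whole replace chain
lemma pv_chain_single (x : Char) :
    (List.flatMap (pvSub '^' [' ', '^', ' '])
      (List.flatMap (pvSub '/' [' ', '/', ' '])
        (List.flatMap (pvSub '*' [' ', '*', ' '])
          (List.flatMap (pvSub '-' [' ', '-', ' '])
            (List.flatMap (pvSub '+' [' ', '+', ' '])
              (List.flatMap (pvSub ')' [' ', ')'])
                (List.flatMap (pvSub '(' ['(', ' ']) [x])))))))
      = pvExpand x := by
  by_cases h1 : x = '('
  · subst h1; decide
  by_cases h2 : x = ')'
  · subst h2; decide
  have : List.flatMap (pvSub ')' [' ', ')']) (List.flatMap (pvSub '(' ['(', ' ']) [x]) = [x] := by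
    simp [pvSub, h1, h2]
  rw [this, pv_ops_single]
  simp [pvExpand, h1, h2]

lemma pv_chain_eq (l : List Char) :
    (List.flatMap (pvSub '^' [' ', '^', ' '])
      (List.flatMap (pvSub '/' [' ', '/', ' '])
        (List.flatMap (pvSub '*' [' ', '*', ' '])
          (List.flatMap (pvSub '-' [' ', '-', ' '])
            (List.flatMap (pvSub '+' [' ', '+', ' '])
              (List.flatMap (pvSub ')' [' ', ')'])
                (List.flatMap (pvSub '(' ['(', ' ']) l)))))))
      = l.flatMap pvExpand := by
  induction l with
  | nil => simp
  | cons x t ih =>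
    have hx := pv_chain_single x
    simp only [List.flatMap_cons, List.flatMap_append] at *
    rw [ih]
    -- reassemble: the chain over [x] prepends pvExpand x
    simpa using congrArg (· ++ t.flatMap pvExpand) hx

-- A's loop is exactly flatMap pvExpand
lemma pv_foldl_expand (l : List Char) :
    ∀ acc : List Char,
      l.foldl (fun acc f =>
        if f = '(' then acc ++ [f, ' ']
        else if f = ')' then acc ++ [' ', f]
        else if f ∈ (['+', '-', '*', '/', '^'] : List Char) then acc ++ [' ', f, ' ']
        else acc ++ [f]) acc = acc ++ l.flatMap pvExpand := by
  induction l with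
  | nil => intro acc; simp
  | cons x t ih =>
    intro acc
    rw [List.foldl_cons, List.flatMap_cons]
    show List.foldl _ (if x = '(' then acc ++ [x, ' ']
        else if x = ')' then acc ++ [' ', x]
        else if x ∈ (['+', '-', '*', '/', '^'] : List Char) then acc ++ [' ', x, ' ']
        else acc ++ [x]) t = acc ++ (pvExpand x ++ t.flatMap pvExpand)
    split_ifs with h1 h2 h3
    · rw [ih]; simp [pvExpand, h1]
    · rw [ih]; simp [pvExpand, h2]
    · rw [ih]; simp [pvExpand, h1, h2, h3]
    · rw [ih]; simp [pvExpand, h1, h2, h3]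

-- ===== VERDICT (by name: the statement is the Claim_ definition above) =====
theorem modify_formula_spec : Claim_equal_modify_formula := by
  intro formula _
  show modify_formula formula = modify_formula_alt formula
  apply String.toList_inj.mp
  simp only [modify_formula, modify_formula_alt, List.foldl_cons, List.foldl_nil,
    PySem.Str.toList_replace, String.toList_ofList]
  rw [pv_foldl_expand]
  have e1 : "(".toList = ['('] := rfl
  have e2 : "( ".toList = ['(', ' '] := rfl
  have e3 : ")".toList = [')'] := rfl
  have e4 : " )".toList = [' ', ')'] := rfl
  rw [e1, e2, e3, e4]
  rw [pv_replace_single, pv_replace_single, pv_replace_single, pv_replace_single,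
      pv_replace_single, pv_replace_single, pv_replace_single]
  exact (List.nil_append _).trans (pv_chain_eq _).symm
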